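-- pv_equiv track=rewrite | github.com/intro-prog-unisabana/examen2-Samuelmlop | lap_timer.py | longest_decreasing_streak
-- ===== SOURCE A (Python) =====
-- def longest_decreasing_streak(timer):
--     times = timer["times"]
--     if not times: return 0
--     max_streak = 1
--     current_streak = 1
--     for i in range(1, len(times)):
--         if times[i] < times[i-1]:
--             current_streak += 1
--         else:
--             current_streak = 1
--         if current_streak > max_streak:
--             max_streak = current_streak
--     return max_streak
-- ===== SOURCE B (Python) =====
-- def longest_decreasing_streak(timer):
--     times = timer["times"]
--     n = len(times)
--     if n == 0:
--         return 0
--     # indices where the strictly-decreasing property breaks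
--     breaks = [i for i, (prev, cur) in enumerate(zip(times, times[1:]), start=1) if cur >= prev]
--     bounds = [0] + breaks + [n]
--     # each maximal strictly-decreasing run is a segment between consecutive bounds
--     return max(b - a for a, b in zip(bounds, bounds[1:]))
-- ===== Notes on version B (the rewrite author's own statement) =====
-- stated objective: alternative
-- what changed: Replaces A's streak-counter scan (running current/max lengths) by a partition decomposition with no streak counter at all: collect the break indices where times[i] >= times[i-1], form the segment boundaries [0] + breaks + [n], and return the maximum gap between consecutive boundaries.
import Mathlib
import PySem

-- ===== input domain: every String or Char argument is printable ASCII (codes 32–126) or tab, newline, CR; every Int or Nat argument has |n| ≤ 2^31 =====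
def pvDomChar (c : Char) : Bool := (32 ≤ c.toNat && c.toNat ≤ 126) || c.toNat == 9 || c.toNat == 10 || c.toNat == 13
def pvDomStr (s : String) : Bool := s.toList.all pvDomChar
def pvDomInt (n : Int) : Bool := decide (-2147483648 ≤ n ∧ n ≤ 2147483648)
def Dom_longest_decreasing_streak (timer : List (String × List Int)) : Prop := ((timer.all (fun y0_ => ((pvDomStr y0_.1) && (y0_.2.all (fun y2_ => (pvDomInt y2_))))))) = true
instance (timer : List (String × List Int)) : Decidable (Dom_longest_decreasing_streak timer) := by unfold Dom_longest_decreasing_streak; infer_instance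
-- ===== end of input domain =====

-- B replaces A's streak-counter scan by a partition decomposition: break indices,
-- segment boundaries, maximum gap between consecutive boundaries (same cost).

-- ===== PORT A =====
-- A: times = timer["times"]; single loop over range(1, len) keeping (max_streak, current_streak).
def longest_decreasing_streak (timer : List (String × List Int)) : Int :=
  match (PySem.Dict.mk timer).get? "times" with
  | none => 0          -- Python raises KeyError here; excluded by Pre_
  | some times =>
    if times = [] then 0
    else
      ((PySem.List.pyRange 1 (times.length : Int) 1).foldl
        (fun (s : Int × Int) i =>
          let cur := if PySem.List.pyGetD times i 0 < PySem.List.pyGetD times (i - 1) 0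
                     then s.2 + 1 else 1
          (if cur > s.1 then cur else s.1, cur)) (1, 1)).1

-- ===== PORT B =====
-- B helper: the comprehension [i for i,(prev,cur) in enumerate(zip(times, times[1:]), 1) if cur >= prev]
def pvBreaksFrom (i : Int) : List (Int × Int) → List Int
  | [] => []
  | (p, c) :: rest => if c ≥ p then i :: pvBreaksFrom (i + 1) rest else pvBreaksFrom (i + 1) rest

def longest_decreasing_streak_alt (timer : List (String × List Int)) : Int :=
  match (PySem.Dict.mk timer).get? "times" with
  | none => 0          -- Python raises KeyError here; excluded by Pre_
  | some times =>
    let n : Int := times.length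
    if n = 0 then 0
    else
      let breaks := pvBreaksFrom 1 (times.zip times.tail)
      let bounds := 0 :: breaks ++ [n]
      let diffs := List.zipWith (fun a b => b - a) bounds bounds.tail
      PySem.List.maxD diffs (fun x => x) 0   -- diffs is never empty, so the default is never used

-- ===== PRECONDITION & SPEC =====
-- Pre_ excludes only the inputs on which A raises KeyError: dicts without the key "times".
def Pre_longest_decreasing_streak (timer : List (String × List Int)) : Prop :=
  "times" ∈ timer.map Prod.fst
instance (timer : List (String × List Int)) : Decidable (Pre_longest_decreasing_streak timer) := by unfold Pre_longest_decreasing_streak; infer_instance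

def pvWitness_longest_decreasing_streak : (List (String × List Int)) := [("times", [5, 3, 2, 4])]

def Spec_longest_decreasing_streak (timer : List (String × List Int)) (out : Int) : Prop := out = longest_decreasing_streak_alt timer
instance (timer : List (String × List Int)) (out : Int) : Decidable (Spec_longest_decreasing_streak timer out) := by unfold Spec_longest_decreasing_streak; infer_instance

-- ===== CLAIM (what is proved, stated in full; the proofs are below) =====
def Claim_equal_longest_decreasing_streak : Prop := ∀ (timer : List (String × List Int)), Dom_longest_decreasing_streak timer → Pre_longest_decreasing_streak timer → Spec_longest_decreasing_streak timer (longest_decreasing_streak timer)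

-- ===== LEMMAS AND PROOFS =====

-- Proof-side reshaping of A's fold: one recursion over the tail, carrying the previous element.
def pvLoopA (prev : Int) (s : Int × Int) : List Int → Int × Int
  | [] => s
  | c :: rest =>
    let cur := if c < prev then s.2 + 1 else 1
    pvLoopA c (if cur > s.1 then cur else s.1, cur) rest

theorem pvFoldA_eq_loopA (rest : List Int) : ∀ (pre : List Int) (prev : Int) (s : Int × Int),
    (PySem.List.pyRange ((pre.length : Int) + 1) ((pre.length : Int) + 1 + rest.length) 1).foldl
      (fun (s : Int × Int) i =>
        let cur := if PySem.List.pyGetD (pre ++ prev :: rest) i 0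
                     < PySem.List.pyGetD (pre ++ prev :: rest) (i - 1) 0
                   then s.2 + 1 else 1
        (if cur > s.1 then cur else s.1, cur)) s
    = pvLoopA prev s rest := by
  induction rest with
  | nil =>
    intro pre prev s
    rw [PySem.List.pyRange_one_eq_nil (by simp)]
    rfl
  | cons c rest ih =>
    intro pre prev s
    rw [PySem.List.pyRange_one_cons (by simp only [List.length_cons]; push_cast; omega)]
    simp only [List.foldl_cons]
    have hget1 : PySem.List.pyGetD (pre ++ prev :: c :: rest) ((pre.length : Int) + 1) 0 = c := by
      have : ((pre.length : Int) + 1) = ((pre.length + 1 : Nat) : Int) := by push_cast; omega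
      rw [this, PySem.List.pyGetD_natCast]
      simp [List.getD]
    have hget0 : PySem.List.pyGetD (pre ++ prev :: c :: rest) ((pre.length : Int) + 1 - 1) 0 = prev := by
      have : ((pre.length : Int) + 1 - 1) = ((pre.length : Nat) : Int) := by ring
      rw [this, PySem.List.pyGetD_natCast]
      simp [List.getD]
    rw [hget1, hget0]
    have hlist : pre ++ prev :: c :: rest = (pre ++ [prev]) ++ c :: rest := by simp
    have hlen : (pre.length : Int) + 1 + (c :: rest).length
        = ((pre ++ [prev]).length : Int) + 1 + rest.length := by
      simp only [List.length_cons, List.length_append, List.length_nil]; push_cast; omega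
    have hlen1 : (pre.length : Int) + 1 + 1 = ((pre ++ [prev]).length : Int) + 1 := by
      simp
    rw [hlist, hlen, hlen1, ih (pre ++ [prev]) c]
    rfl

-- Proof-side gap list of the boundary list start :: bs ++ [n].
def pvGaps (start : Int) : List Int → Int → List Int
  | [], n => [n - start]
  | b :: bs, n => (b - start) :: pvGaps b bs n

theorem pvGaps_eq_zipWith (bs : List Int) : ∀ (start n : Int),
    List.zipWith (fun a b => b - a) (start :: bs ++ [n]) ((start :: bs ++ [n]).tail)
      = pvGaps start bs n := by
  induction bs with
  | nil => intro start n; rfl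
  | cons b bs ih =>
    intro start n
    simpa [pvGaps, List.zipWith] using ih b n

theorem pvBreaksFrom_ge (pairs : List (Int × Int)) : ∀ (i : Int),
    ∀ b ∈ pvBreaksFrom i pairs, i ≤ b := by
  induction pairs with
  | nil => intro i b hb; simp [pvBreaksFrom] at hb
  | cons pc rest ih =>
    intro i b hb
    obtain ⟨p, c⟩ := pc
    simp only [pvBreaksFrom] at hb
    split at hb
    · rcases List.mem_cons.mp hb with h | h
      · omega
      · have := ih (i + 1) b h; omega
    · have := ih (i + 1) b hb; omega

theorem pvGaps_head_ge (bs : List Int) (start n i : Int)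
    (hb : ∀ b ∈ bs, i ≤ b) (hn : i ≤ n) :
    ∀ g ∈ (pvGaps start bs n).head?, i - start ≤ g := by
  cases bs with
  | nil => intro g hg; simp [pvGaps] at hg; omega
  | cons b bs =>
    intro g hg
    simp [pvGaps] at hg
    have := hb b (by simp)
    omega

-- The invariant tying A's loop state to B's gap list.
theorem pvInv (rest : List Int) : ∀ (prev i ms cur : Int), 1 ≤ cur → cur ≤ ms →
    (pvLoopA prev (ms, cur) rest).1
      = (pvGaps (i - cur) (pvBreaksFrom i ((prev :: rest).zip rest)) (i + rest.length)).foldl max ms := by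
  induction rest with
  | nil =>
    intro prev i ms cur h1 h2
    simp only [pvLoopA, List.zip_nil_right, pvBreaksFrom, pvGaps, List.length_nil,
      Nat.cast_zero, add_zero, List.foldl_cons, List.foldl_nil]
    omega
  | cons c rest ih =>
    intro prev i ms cur h1 h2
    simp only [List.zip_cons_cons, pvBreaksFrom, pvLoopA]
    by_cases hlt : c < prev
    · have hge : ¬ c ≥ prev := by omega
      simp only [if_pos hlt, if_neg hge]
      have hst : (if cur + 1 > ms then cur + 1 else ms) = max ms (cur + 1) := by
        split_ifs <;> omega
      rw [hst]
      have hrec := ih c (i + 1) (max ms (cur + 1)) (cur + 1) (by omega) (by omega)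
      have hstart : (i + 1) - (cur + 1) = i - cur := by ring
      rw [hstart] at hrec
      rw [hrec]
      have hlen : i + ((c :: rest).length : Int) = (i + 1) + (rest.length : Int) := by
        simp only [List.length_cons]; push_cast; omega
      rw [hlen]
      -- absorb `cur + 1` into the first gap, which is at least (i+1) - (i-cur) = cur + 1
      cases hgaps : pvGaps (i - cur) (pvBreaksFrom (i + 1) ((c :: rest).zip rest)) (i + 1 + rest.length) with
      | nil =>
        exfalso
        cases hb : pvBreaksFrom (i + 1) ((c :: rest).zip rest) <;>
          rw [hb] at hgaps <;> simp [pvGaps] at hgaps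
      | cons g gs =>
        have hg : cur + 1 ≤ g := by
          have := pvGaps_head_ge (pvBreaksFrom (i + 1) ((c :: rest).zip rest)) (i - cur)
            (i + 1 + rest.length) (i + 1)
            (pvBreaksFrom_ge _ (i + 1)) (by omega) g (by rw [hgaps]; rfl)
          omega
        simp only [List.foldl_cons]
        have : max (max ms (cur + 1)) g = max ms g := by omega
        rw [this]
    · have hge : c ≥ prev := by omega
      simp only [if_neg hlt, if_pos hge]
      have hst : (if (1 : Int) > ms then 1 else ms) = ms := by split_ifs <;> omega
      rw [hst]
      have hrec := ih c (i + 1) ms 1 (by omega) (by omega)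
      have hstart : (i + 1) - 1 = i := by ring
      rw [hstart] at hrec
      have hlen : i + ((c :: rest).length : Int) = (i + 1) + (rest.length : Int) := by
        simp only [List.length_cons]; push_cast; omega
      have hcur : max ms (i - (i - cur)) = ms := by omega
      simp only [pvGaps, List.foldl_cons, hcur, hlen]
      exact hrec

-- ===== VERDICT (by name: the statement is the Claim_ definition above) =====
theorem longest_decreasing_streak_spec : Claim_equal_longest_decreasing_streak := by
  intro timer _ hpre
  unfold Spec_longest_decreasing_streak longest_decreasing_streak longest_decreasing_streak_alt
  cases hget : (PySem.Dict.mk timer).get? "times" with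
  | none => rfl
  | some times =>
    cases times with
    | nil => rfl
    | cons t rest =>
      dsimp only
      rw [if_neg (List.cons_ne_nil t rest), if_neg (by simp [List.length_cons]; positivity)]
      have hA := pvFoldA_eq_loopA rest [] t (1, 1)
      simp only [List.nil_append, List.length_nil, Nat.cast_zero, zero_add] at hA
      have hlen : ((t :: rest).length : Int) = 1 + (rest.length : Int) := by
        simp [add_comm]
      rw [hlen]
      have hinv := pvInv rest t 1 1 1 le_rfl le_rfl
      have h0 : (1 : Int) - 1 = 0 := by ring
      rw [h0] at hinv
      have hdiffs := pvGaps_eq_zipWith (pvBreaksFrom 1 ((t :: rest).zip (t :: rest).tail))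
        0 (1 + (rest.length : Int))
      simp only [List.tail_cons] at hdiffs ⊢
      rw [hdiffs]
      cases hgaps : pvGaps 0 (pvBreaksFrom 1 ((t :: rest).zip rest)) (1 + rest.length) with
      | nil =>
        exfalso
        cases hb : pvBreaksFrom 1 ((t :: rest).zip rest) <;>
          rw [hb] at hgaps <;> simp [pvGaps] at hgaps
      | cons g gs =>
        have hg : (1 : Int) ≤ g := by
          have := pvGaps_head_ge (pvBreaksFrom 1 ((t :: rest).zip rest)) 0
            (1 + rest.length) 1 (pvBreaksFrom_ge _ 1) (by omega) g (by rw [hgaps]; rfl)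
          omega
        rw [PySem.List.maxD_id_cons]
        refine (congrArg Prod.fst hA).trans ?_
        rw [hinv, hgaps]
        simp only [List.foldl_cons]
        have : max (1 : Int) g = g := by omega
        rw [this]
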